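-- pv_equiv track=rewrite | github.com/ChernovAndrey/HSE_ordered_sets | aggregate_functions.py | simple_aggregate_function_ps
-- ===== SOURCE A (Python) =====
-- def simple_aggregate_function_ps(dict_inter):  # ps - pattern structures
--     sum_plus = 0
--     sum_neg = 0
--     sum_plus_cf = 0
--     sum_neg_cf = 0
--     for key, value in dict_inter.items():
--         sum_plus += value[0]
--         sum_neg += value[1]
--         sum_plus_cf += value[2]
--         sum_neg_cf += value[3]
--     return int(sum_plus + sum_plus_cf >= sum_neg + sum_neg_cf), sum_plus, sum_neg, sum_plus_cf,  sum_neg_cf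
-- ===== SOURCE B (Python) =====
-- def simple_aggregate_function_ps(dict_inter):  # ps - pattern structures
--     # divide-and-conquer (tree) reduction over the values instead of a linear accumulator loop
--     def reduce(vs):
--         if len(vs) == 0:
--             return (0, 0, 0, 0)
--         if len(vs) == 1:
--             v = vs[0]
--             return (v[0], v[1], v[2], v[3])
--         mid = len(vs) // 2
--         a = reduce(vs[:mid])
--         b = reduce(vs[mid:])
--         return (a[0] + b[0], a[1] + b[1], a[2] + b[2], a[3] + b[3])
--     sum_plus, sum_neg, sum_plus_cf, sum_neg_cf = reduce(list(dict_inter.values()))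
--     return int(sum_plus + sum_plus_cf >= sum_neg + sum_neg_cf), sum_plus, sum_neg, sum_plus_cf, sum_neg_cf
-- ===== Notes on version B (the rewrite author's own statement) =====
-- stated objective: alternative
-- what changed: Replaces A's linear left-to-right loop with four running accumulators by a recursive divide-and-conquer tree reduction that splits the value list in halves and combines the four partial sums componentwise.
import Mathlib
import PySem

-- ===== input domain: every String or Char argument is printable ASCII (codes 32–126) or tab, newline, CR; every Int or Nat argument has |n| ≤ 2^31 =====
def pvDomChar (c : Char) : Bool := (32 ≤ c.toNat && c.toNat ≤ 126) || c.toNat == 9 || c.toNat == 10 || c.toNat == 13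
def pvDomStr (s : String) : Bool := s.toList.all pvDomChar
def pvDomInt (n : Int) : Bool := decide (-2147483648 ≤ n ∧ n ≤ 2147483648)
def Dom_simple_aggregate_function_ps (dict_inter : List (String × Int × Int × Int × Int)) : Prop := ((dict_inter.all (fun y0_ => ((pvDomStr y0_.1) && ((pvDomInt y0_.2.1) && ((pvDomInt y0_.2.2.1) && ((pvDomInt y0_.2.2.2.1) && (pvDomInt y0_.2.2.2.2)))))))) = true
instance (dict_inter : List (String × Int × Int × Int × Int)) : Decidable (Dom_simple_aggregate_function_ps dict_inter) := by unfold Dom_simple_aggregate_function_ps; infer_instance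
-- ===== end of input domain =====

-- B replaces A's single linear loop with four running accumulators by a recursive
-- divide-and-conquer tree reduction over the values (objective: alternative).

-- ===== PORT A =====
-- one pass over items, four running sums updated together
def simple_aggregate_function_ps (dict_inter : List (String × Int × Int × Int × Int)) : Int × Int × Int × Int × Int :=
  let s := dict_inter.foldl
    (fun (acc : Int × Int × Int × Int) kv =>
      (acc.1 + kv.2.1, acc.2.1 + kv.2.2.1, acc.2.2.1 + kv.2.2.2.1, acc.2.2.2 + kv.2.2.2.2))
    (0, 0, 0, 0)
  ((if s.1 + s.2.2.1 ≥ s.2.1 + s.2.2.2 then 1 else 0), s.1, s.2.1, s.2.2.1, s.2.2.2)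

-- ===== PORT B =====
-- divide-and-conquer reduction: split the value list in halves, combine componentwise
def pvReduce (vs : List (Int × Int × Int × Int)) : Int × Int × Int × Int :=
  if h : vs.length ≤ 1 then
    match vs with
    | [] => (0, 0, 0, 0)
    | v :: _ => (v.1, v.2.1, v.2.2.1, v.2.2.2)
  else
    let mid := vs.length / 2
    let a := pvReduce (vs.take mid)
    let b := pvReduce (vs.drop mid)
    (a.1 + b.1, a.2.1 + b.2.1, a.2.2.1 + b.2.2.1, a.2.2.2 + b.2.2.2)
termination_by vs.length
decreasing_by
  · simp only [List.length_take]; omega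
  · simp only [List.length_drop]; omega

def simple_aggregate_function_ps_alt (dict_inter : List (String × Int × Int × Int × Int)) : Int × Int × Int × Int × Int :=
  let s := pvReduce (dict_inter.map (·.2))
  ((if s.1 + s.2.2.1 ≥ s.2.1 + s.2.2.2 then 1 else 0), s.1, s.2.1, s.2.2.1, s.2.2.2)

-- ===== PRECONDITION & SPEC =====
def Spec_simple_aggregate_function_ps (dict_inter : List (String × Int × Int × Int × Int)) (out : Int × Int × Int × Int × Int) : Prop := out = simple_aggregate_function_ps_alt dict_inter
instance (dict_inter : List (String × Int × Int × Int × Int)) (out : Int × Int × Int × Int × Int) : Decidable (Spec_simple_aggregate_function_ps dict_inter out) := by unfold Spec_simple_aggregate_function_ps; infer_instance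

-- ===== CLAIM =====
def Claim_equal_simple_aggregate_function_ps : Prop := ∀ (dict_inter : List (String × Int × Int × Int × Int)), Dom_simple_aggregate_function_ps dict_inter → Spec_simple_aggregate_function_ps dict_inter (simple_aggregate_function_ps dict_inter)

-- ===== LEMMAS AND PROOFS =====
-- the tree reduction computes the four column sums
theorem pvReduce_eq (vs : List (Int × Int × Int × Int)) :
    pvReduce vs = ((vs.map (·.1)).sum, (vs.map (·.2.1)).sum,
                   (vs.map (·.2.2.1)).sum, (vs.map (·.2.2.2)).sum) := by
  induction vs using pvReduce.induct with
  | case1 h => simp [pvReduce]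
  | case2 v tl h =>
    have : tl = [] := by simpa using h
    subst this; simp [pvReduce]
  | case3 vs h mid iha ihb =>
    rw [pvReduce]
    simp only [dif_neg h]
    show (_ + _, _ + _, _ + _, _ + _) = _
    rw [iha, ihb]
    have h4 : ∀ f : (Int × Int × Int × Int) → Int,
        ((vs.take mid).map f).sum + ((vs.drop mid).map f).sum = (vs.map f).sum := by
      intro f
      rw [← List.sum_append, ← List.map_append, List.take_append_drop]
    simp [h4]

-- A's fold computes the same four column sums
theorem pv_fold_eq_sums (l : List (String × Int × Int × Int × Int)) (a b c d : Int) :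
    l.foldl
      (fun (acc : Int × Int × Int × Int) kv =>
        (acc.1 + kv.2.1, acc.2.1 + kv.2.2.1, acc.2.2.1 + kv.2.2.2.1, acc.2.2.2 + kv.2.2.2.2))
      (a, b, c, d)
    = (a + ((l.map (·.2)).map (·.1)).sum,
       b + ((l.map (·.2)).map (·.2.1)).sum,
       c + ((l.map (·.2)).map (·.2.2.1)).sum,
       d + ((l.map (·.2)).map (·.2.2.2)).sum) := by
  induction l generalizing a b c d with
  | nil => simp
  | cons hd tl ih =>
    simp only [List.foldl_cons, List.map_cons, List.sum_cons, ih]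
    refine Prod.ext ?_ (Prod.ext ?_ (Prod.ext ?_ ?_)) <;> simp <;> ring

-- ===== VERDICT =====
theorem simple_aggregate_function_ps_spec : Claim_equal_simple_aggregate_function_ps := by
  intro l _
  unfold Spec_simple_aggregate_function_ps simple_aggregate_function_ps simple_aggregate_function_ps_alt
  simp only [pv_fold_eq_sums, pvReduce_eq, zero_add]
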